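-- pv_equiv track=rewrite | github.com/tud-ccc/mocasin | mocasin/representations/automorphisms.py | to_labeled_edge_graph
-- ===== SOURCE A (Python) =====
-- def to_labeled_edge_graph(g):
--     num_nodes = 0
--     nodes_correspondence = {}
--     edge_graph = {}
--     coloring_values = {}
--
--     # probably inefficient: first label, then add edges, but simpler.
--     for node_from in g.keys():
--         for (node_to, value_raw) in g[node_from]:
--             value = (value_raw, node_to[1])  # add proc type to value
--             nodes_correspondence[num_nodes] = ((node_from, node_to), value)
--             if value not in coloring_values:
--                 coloring_values[value] = []
--             coloring_values[value].append(num_nodes)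
--             num_nodes = num_nodes + 1
--
--         for i in nodes_correspondence:
--             edge_graph[i] = []
--             for j in nodes_correspondence:
--                 if (
--                     nodes_correspondence[i][0][1]
--                     == nodes_correspondence[j][0][0]
--                 ):  # node_to equals node_from
--                     edge_graph[i].append(j)
--
--     coloring = list(map(lambda x: set(x), coloring_values.values()))
--
--     return edge_graph, num_nodes, coloring, nodes_correspondence
-- ===== SOURCE B (Python) =====
-- def to_labeled_edge_graph(g):
--     # One flattening pass collects all labeled edges; a hash index keyed by
--     # node_from then gives each node's successors in one lookup.
--     edges = []
--     for node_from, adjacency in g.items():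
--         for node_to, value_raw in adjacency:
--             edges.append(((node_from, node_to), (value_raw, node_to[1])))
--
--     by_source = {}
--     coloring_values = {}
--     for i, (ends, value) in enumerate(edges):
--         by_source.setdefault(ends[0], []).append(i)
--         coloring_values.setdefault(value, []).append(i)
--
--     edge_graph = {
--         i: list(by_source.get(ends[1], [])) for i, (ends, _value) in enumerate(edges)
--     }
--     nodes_correspondence = dict(enumerate(edges))
--     coloring = [set(ids) for ids in coloring_values.values()]
--     return edge_graph, len(edges), coloring, nodes_correspondence
-- ===== Notes on version B (the rewrite author's own statement) =====
-- stated objective: faster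
-- what changed: Flatten the graph once into an edge list, group edge indices by source node in a single dict-building pass, and read each node's adjacency with one hash lookup, instead of re-running a quadratic all-pairs scan over all nodes after every key of g.
import Mathlib
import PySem

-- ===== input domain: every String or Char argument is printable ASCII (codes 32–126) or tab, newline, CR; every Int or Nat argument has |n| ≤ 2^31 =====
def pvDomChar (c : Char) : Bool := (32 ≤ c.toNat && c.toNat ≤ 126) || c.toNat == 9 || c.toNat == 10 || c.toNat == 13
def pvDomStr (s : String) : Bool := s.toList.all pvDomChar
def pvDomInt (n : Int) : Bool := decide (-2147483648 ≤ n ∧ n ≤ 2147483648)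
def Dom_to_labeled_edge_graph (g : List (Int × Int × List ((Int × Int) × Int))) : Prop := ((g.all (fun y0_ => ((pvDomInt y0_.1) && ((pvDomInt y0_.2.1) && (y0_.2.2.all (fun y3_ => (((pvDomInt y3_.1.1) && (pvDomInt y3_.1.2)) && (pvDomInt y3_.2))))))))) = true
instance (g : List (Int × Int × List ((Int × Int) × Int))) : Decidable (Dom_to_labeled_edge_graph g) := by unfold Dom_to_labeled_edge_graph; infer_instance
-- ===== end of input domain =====

-- B replaces A's per-key quadratic all-pairs rescan by one flattening pass plus a
-- dict grouping edge indices by source node (objective: faster; asymptotic change).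


-- ===== PORT A =====
-- g[node_from]: first-match lookup in the association list; the [] default is
-- Python's KeyError, unreachable because node_from always comes from g's own keys.
def tlegLookup (g : List (Int × Int × List ((Int × Int) × Int))) (k : Int × Int) :
    List ((Int × Int) × Int) :=
  match g.find? (fun e => (e.1, e.2.1) == k) with
  | some e => e.2.2
  | none => []

def to_labeled_edge_graph (g : List (Int × Int × List ((Int × Int) × Int))) : (List (Int × List Int)) × Int × List (List Int) × (List (Int × ((Int × Int) × (Int × Int)) × (Int × Int))) :=
  -- state: (num_nodes, nodes_correspondence, edge_graph, coloring_values)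
  let st := g.foldl
    (fun (st : Int × PySem.Dict Int (((Int × Int) × (Int × Int)) × (Int × Int)) ×
               PySem.Dict Int (List Int) × PySem.Dict (Int × Int) (List Int)) e =>
      let node_from := (e.1, e.2.1)
      -- for (node_to, value_raw) in g[node_from]:
      let st1 := (tlegLookup g node_from).foldl
        (fun st p =>
          let (n, nc, eg, cv) := st
          let value := (p.2, p.1.2)
          let nc := nc.insert n ((node_from, p.1), value)
          let cv := if cv.contains value then cv else cv.insert value []
          let cv := cv.modify value [] (fun l => l ++ [n])
          (n + 1, nc, eg, cv)) st
      -- for i in nodes_correspondence: edge_graph[i] = []; for j in …: append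
      let (n, nc, eg, cv) := st1
      let eg := nc.keys.foldl
        (fun eg i =>
          let eg := eg.insert i []
          nc.keys.foldl
            (fun eg j =>
              if (nc.getD i (((0, 0), (0, 0)), (0, 0))).1.2 ==
                 (nc.getD j (((0, 0), (0, 0)), (0, 0))).1.1
              then eg.modify i [] (fun l => l ++ [j]) else eg) eg) eg
      (n, nc, eg, cv))
    (0, PySem.Dict.empty, PySem.Dict.empty, PySem.Dict.empty)
  let (n, _nc, eg, cv) := st
  (eg.items, n, cv.values.map PySem.Set.ofList, (st.2.1).items)

-- ===== PORT B =====
def to_labeled_edge_graph_alt (g : List (Int × Int × List ((Int × Int) × Int))) : (List (Int × List Int)) × Int × List (List Int) × (List (Int × ((Int × Int) × (Int × Int)) × (Int × Int))) :=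
  -- edges.append(((node_from, node_to), (value_raw, node_to[1])))
  let edges := g.foldl
    (fun acc e => acc ++ e.2.2.map (fun p => (((e.1, e.2.1), p.1), (p.2, p.1.2)))) []
  -- d.setdefault(k, []).append(i) leaves d with d[k] = d.get(k, []) + [i]: Dict.modify
  let grouped := (PySem.List.enumerate edges).foldl
    (fun (st : PySem.Dict (Int × Int) (List Int) × PySem.Dict (Int × Int) (List Int)) ie =>
      (st.1.modify ie.2.1.1 [] (fun l => l ++ [ie.1]),
       st.2.modify ie.2.2 [] (fun l => l ++ [ie.1])))
    (PySem.Dict.empty, PySem.Dict.empty)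
  -- the dict comprehension / dict(enumerate(edges)) over the distinct keys 0..n-1
  -- are exactly these association lists
  let edge_graph := (PySem.List.enumerate edges).map
    (fun ie => (ie.1, grouped.1.getD ie.2.1.2 []))
  (edge_graph, (edges.length : Int),
   grouped.2.values.map PySem.Set.ofList, PySem.List.enumerate edges)

-- ===== PRECONDITION & SPEC =====
-- Pre_ is the dict invariant: the keys of g are pairwise distinct. A Python dict can
-- never carry duplicate keys, so no input the Python A accepts is excluded; on
-- duplicate-key association lists the two ports legitimately disagree.
def Pre_to_labeled_edge_graph (g : List (Int × Int × List ((Int × Int) × Int))) : Prop :=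
  (g.map (fun e => (e.1, e.2.1))).Nodup
instance (g : List (Int × Int × List ((Int × Int) × Int))) : Decidable (Pre_to_labeled_edge_graph g) := by unfold Pre_to_labeled_edge_graph; infer_instance

def pvWitness_to_labeled_edge_graph : (List (Int × Int × List ((Int × Int) × Int))) :=
  [(0, 1, [((1, 2), 5)]), (1, 2, [((0, 1), 7), ((1, 2), 5)])]

def Spec_to_labeled_edge_graph (g : List (Int × Int × List ((Int × Int) × Int))) (out : (List (Int × List Int)) × Int × List (List Int) × (List (Int × ((Int × Int) × (Int × Int)) × (Int × Int)))) : Prop := out = to_labeled_edge_graph_alt g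
instance (g : List (Int × Int × List ((Int × Int) × Int))) (out : (List (Int × List Int)) × Int × List (List Int) × (List (Int × ((Int × Int) × (Int × Int)) × (Int × Int)))) : Decidable (Spec_to_labeled_edge_graph g out) := by unfold Spec_to_labeled_edge_graph; rw [Prod.ext_iff, Prod.ext_iff, Prod.ext_iff]; infer_instance

-- ===== CLAIM (what is proved, stated in full; the proofs are below) =====
def Claim_equal_to_labeled_edge_graph : Prop := ∀ (g : List (Int × Int × List ((Int × Int) × Int))), Dom_to_labeled_edge_graph g → Pre_to_labeled_edge_graph g → Spec_to_labeled_edge_graph g (to_labeled_edge_graph g)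


-- ===== LEMMAS AND PROOFS =====

abbrev NCv : Type := ((Int × Int) × (Int × Int)) × (Int × Int)
abbrev DCV : Type := PySem.Dict (Int × Int) (List Int)

lemma cv_collapse (cv : DCV) (v : Int × Int) (n : Int) :
    ((if cv.contains v then cv else cv.insert v []).modify v [] (fun l => l ++ [n]))
      = cv.modify v [] (fun l => l ++ [n]) := by
  by_cases h : cv.contains v
  · simp [h]
  · simp only [h, Bool.false_eq_true, if_false]
    show (cv.insert v []).insert v _ = cv.insert v _
    rw [PySem.Dict.getD_insert_self, PySem.Dict.insert_insert_self,
        PySem.Dict.getD_of_not_contains]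
    simpa using h

lemma lookup_self0 (g : List (Int × Int × List ((Int × Int) × Int)))
    (hnd : (g.map (fun e => (e.1, e.2.1))).Nodup) (e : Int × Int × List ((Int × Int) × Int))
    (he : e ∈ g) :
    g.find? (fun x => (x.1, x.2.1) == (e.1, e.2.1)) = some e := by
  induction g with
  | nil => simp at he
  | cons a g ih =>
    rcases List.mem_cons.mp he with rfl | he
    · rw [List.find?_cons_of_pos (by simp)]
    · have hne : (a.1, a.2.1) ≠ (e.1, e.2.1) := by
        intro hkey
        have : (e.1, e.2.1) ∈ g.map (fun e => (e.1, e.2.1)) := List.mem_map_of_mem he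
        simp only [List.map_cons, List.nodup_cons] at hnd
        exact hnd.1 (hkey ▸ this)
      rw [List.find?_cons_of_neg (by simpa using hne)]
      exact ih (by simp only [List.map_cons, List.nodup_cons] at hnd; exact hnd.2) he
abbrev DNC : Type := PySem.Dict Int NCv
abbrev DEG : Type := PySem.Dict Int (List Int)
def edm (nf : Int × Int) (p : (Int × Int) × Int) : NCv := ((nf, p.1), (p.2, p.1.2))
def coreStep (s : Int × DNC × DCV) (ed : NCv) : Int × DNC × DCV :=
  (s.1 + 1, s.2.1.insert s.1 ed, s.2.2.modify ed.2 [] (fun l => l ++ [s.1]))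
def cvStep (d : DCV) (ie : Int × NCv) : DCV := d.modify ie.2.2 [] (fun l => l ++ [ie.1])

lemma innerA_eq (nf : Int × Int) (l : List ((Int × Int) × Int)) :
    ∀ (st : Int × DNC × DEG × DCV),
    l.foldl
      (fun st p =>
        let (n, nc, eg, cv) := st
        let value := (p.2, p.1.2)
        let nc := nc.insert n ((nf, p.1), value)
        let cv := if cv.contains value then cv else cv.insert value []
        let cv := cv.modify value [] (fun l => l ++ [n])
        (n + 1, nc, eg, cv)) st
      = (let c := (l.map (edm nf)).foldl coreStep (st.1, st.2.1, st.2.2.2)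
         (c.1, c.2.1, st.2.2.1, c.2.2)) := by
  induction l with
  | nil => intro st; rfl
  | cons p l ih =>
    intro ⟨n, nc, eg, cv⟩
    simp only [List.foldl_cons, List.map_cons]
    rw [ih]
    simp [coreStep, edm, cv_collapse]

lemma inner_edge_fold (c : Int → Bool) (l : List Int) :
    ∀ (eg : DEG) (i : Int) (acc : List Int),
    l.foldl (fun eg j => if c j then eg.modify i [] (fun v => v ++ [j]) else eg)
        (eg.insert i acc)
      = eg.insert i (acc ++ l.filter c) := by
  induction l with
  | nil => intro eg i acc; simp
  | cons j l ih =>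
    intro eg i acc
    simp only [List.foldl_cons]
    by_cases h : c j
    · have : (eg.insert i acc).modify i [] (fun v => v ++ [j]) = eg.insert i (acc ++ [j]) := by
        show (eg.insert i acc).insert i _ = _
        rw [PySem.Dict.getD_insert_self, PySem.Dict.insert_insert_self]
      rw [h, if_pos rfl, this, ih]
      simp [h]
    · rw [if_neg (by simpa using h), ih]
      simp [h]

lemma core_fold (E' : List NCv) :
    ∀ (E0 : List NCv) (cv0 : DCV),
    E'.foldl coreStep ((E0.length : Int), PySem.Dict.mk (PySem.List.enumerate E0), cv0)
      = (((E0 ++ E').length : Int), PySem.Dict.mk (PySem.List.enumerate (E0 ++ E')),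
         (PySem.List.enumerate E' (E0.length : Int)).foldl cvStep cv0) := by
  induction E' with
  | nil => intro E0 cv0; simp
  | cons ed E' ih =>
    intro E0 cv0
    simp only [List.foldl_cons]
    have hfresh : (PySem.Dict.mk (PySem.List.enumerate E0) : DNC).contains ((E0.length : Int)) = false := by
      rw [Bool.eq_false_iff]
      intro hc
      have := (PySem.Dict.contains_iff_mem_keys _ _).mp hc
      simp only [PySem.Dict.keys_mk] at this
      rw [show (List.map (fun p => p.1) (PySem.List.enumerate E0)) = _ from PySem.List.map_fst_enumerate E0 0] at this
      rw [zero_add, PySem.List.pyRange_zero_natCast] at this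
      simp at this
    have hins : ((PySem.Dict.mk (PySem.List.enumerate E0) : DNC).insert (E0.length : Int) ed)
        = PySem.Dict.mk (PySem.List.enumerate (E0 ++ [ed])) := by
      apply PySem.Dict.ext
      rw [PySem.Dict.items_insert_of_not_contains _ _ hfresh]
      show PySem.List.enumerate E0 ++ [((E0.length : Int), ed)] = _
      rw [PySem.List.enumerate_append]
      simp [PySem.List.enumerate]
    have : coreStep ((E0.length : Int), PySem.Dict.mk (PySem.List.enumerate E0), cv0) ed
        = (((E0 ++ [ed]).length : Int), PySem.Dict.mk (PySem.List.enumerate (E0 ++ [ed])),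
           cvStep cv0 ((E0.length : Int), ed)) := by
      simp only [coreStep, cvStep, hins]
      simp
    rw [this, ih (E0 ++ [ed])]
    simp only [List.append_assoc, List.singleton_append, List.length_append, List.length_cons,
      List.length_nil, PySem.List.enumerate]
    norm_num [List.foldl_cons]
lemma bysrc_getD (E : List NCv) (s : Int × Int) :
    ((PySem.List.enumerate E).foldl
        (fun d ie => d.modify ie.2.1.1 [] (fun l => l ++ [ie.1]))
        (PySem.Dict.empty : DCV)).getD s []
      = ((PySem.List.enumerate E).filter (fun je => je.2.1.1 == s)).map (fun x => x.1) := by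
  have h1 : (PySem.List.enumerate E).foldl
        (fun d ie => d.modify ie.2.1.1 [] (fun l => l ++ [ie.1])) (PySem.Dict.empty : DCV)
      = ((PySem.List.enumerate E).map (fun ie => (ie.2.1.1, ie.1))).foldl
        (fun d p => d.modify p.1 [] (fun l => l ++ [p.2])) (PySem.Dict.empty : DCV) := by
    rw [List.foldl_map]
  rw [h1, PySem.Dict.getD_foldl_modify_append]
  rw [List.filter_map]
  simp [Function.comp_def]

lemma overwrite_fold (ks : List Int) (f val : Int → List Int) :
    ∀ (pre : List (Int × List Int)) (m : Nat) (d : DEG), (pre.map (fun p => p.1) ++ ks).Nodup →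
    d.items = pre ++ ((ks.take m).map (fun k => (k, val k))) →
    (ks.foldl (fun d i => d.insert i (f i)) d).items = pre ++ ks.map (fun i => (i, f i)) := by
  induction ks with
  | nil => intro pre m d _ hd; simpa using hd
  | cons k ks ih =>
    intro pre m d hnd hd
    have hkpre : k ∉ pre.map (fun p => p.1) := by
      intro hmem
      exact (List.disjoint_of_nodup_append hnd) hmem (by simp)
    have hkks : k ∉ ks := by
      have := (List.nodup_append.mp hnd).2.1
      simp only [List.nodup_cons] at this
      exact this.1
    simp only [List.foldl_cons]
    cases m with
    | zero =>
      have hcont : d.contains k = false := by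
        rw [Bool.eq_false_iff]
        intro hc
        have hm := (PySem.Dict.contains_iff_mem_keys _ _).mp hc
        simp only [PySem.Dict.keys, hd] at hm
        exact hkpre (by simpa using hm)
      have hitems : (d.insert k (f k)).items = (pre ++ [(k, f k)]) ++ [] := by
        rw [PySem.Dict.items_insert_of_not_contains _ _ hcont, hd]
        simp
      have := ih (pre ++ [(k, f k)]) 0 (d.insert k (f k))
        (by simpa using hnd) (by simpa using hitems)
      rw [this]; simp
    | succ m =>
      have hcont : d.contains k = true := by
        rw [PySem.Dict.contains_iff_mem_keys]
        simp only [PySem.Dict.keys, hd]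
        simp
      have hitems : (d.insert k (f k)).items
          = (pre ++ [(k, f k)]) ++ ((ks.take m).map (fun k => (k, val k))) := by
        rw [PySem.Dict.items_insert_of_contains _ _ hcont, hd]
        simp only [List.take_succ_cons, List.map_cons, List.map_append]
        have hpre : pre.map (fun p => if (p.1 == k) = true then (k, f k) else p) = pre := by
          conv_rhs => rw [← List.map_id pre]
          apply List.map_congr_left
          intro p hp
          have : p.1 ≠ k := by
            intro h; exact hkpre (h ▸ List.mem_map_of_mem hp)
          simp [this]
        have htk : ((ks.take m).map (fun k => (k, val k))).map
            (fun p => if (p.1 == k) = true then (k, f k) else p)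
            = (ks.take m).map (fun k => (k, val k)) := by
          rw [List.map_map]
          apply List.map_congr_left
          intro j hj
          have : j ≠ k := by
            intro h; exact hkks (h ▸ List.mem_of_mem_take hj)
          simp [this]
        simp only [hpre, htk]
        simp
      have := ih (pre ++ [(k, f k)]) m (d.insert k (f k))
        (by simpa using hnd) hitems
      rw [this]; simp
def edgeLoopF (nc : DNC) (eg : DEG) : DEG :=
  nc.keys.foldl
    (fun eg i =>
      let eg := eg.insert i []
      nc.keys.foldl
        (fun eg j =>
          if (nc.getD i (((0, 0), (0, 0)), (0, 0))).1.2 ==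
             (nc.getD j (((0, 0), (0, 0)), (0, 0))).1.1
          then eg.modify i [] (fun l => l ++ [j]) else eg) eg) eg
def adjE (E : List NCv) (ed : NCv) : List Int :=
  ((PySem.List.enumerate E).filter (fun je => ed.1.2 == je.2.1.1)).map (fun x => x.1)
def egItems (E : List NCv) : List (Int × List Int) :=
  (PySem.List.enumerate E).map (fun ie => (ie.1, adjE E ie.2))

lemma pyr_nodup (n : Nat) : (PySem.List.pyRange 0 (n : Int)).Nodup := by
  rw [PySem.List.pyRange_zero_natCast]
  exact List.Nodup.map (fun a b h => by exact_mod_cast h) (List.nodup_range)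

lemma pyr_take (m n : Nat) (h : m ≤ n) :
    PySem.List.pyRange 0 (m : Int) = (PySem.List.pyRange 0 (n : Int)).take m := by
  rw [PySem.List.pyRange_zero_natCast, PySem.List.pyRange_zero_natCast, ← List.map_take,
      List.take_range, Nat.min_eq_left h]

lemma keys_mkEnum (E : List NCv) :
    (PySem.Dict.mk (PySem.List.enumerate E) : DNC).keys = PySem.List.pyRange 0 (E.length : Int) := by
  show (PySem.List.enumerate E).map (fun p => p.1) = _
  rw [PySem.List.map_fst_enumerate, zero_add]

lemma getD_mkEnum (E : List NCv) (ie : Int × NCv) (hie : ie ∈ PySem.List.enumerate E) :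
    (PySem.Dict.mk (PySem.List.enumerate E) : DNC).getD ie.1 ((((0, 0), (0, 0)), (0, 0)) : NCv)
      = ie.2 := by
  have hnd : (PySem.Dict.mk (PySem.List.enumerate E) : DNC).keys.Nodup := by
    rw [keys_mkEnum]; exact pyr_nodup E.length
  exact PySem.Dict.getD_of_mem_items _ (by simpa using hie) hnd _

lemma edgeLoop_eq (E : List NCv) (m : Nat) (eg : DEG) (hm : m ≤ E.length)
    (hk : eg.keys = PySem.List.pyRange 0 (m : Int)) :
    edgeLoopF (PySem.Dict.mk (PySem.List.enumerate E)) eg = PySem.Dict.mk (egItems E) := by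
  set nc : DNC := PySem.Dict.mk (PySem.List.enumerate E) with hnc
  set d0 : NCv := (((0, 0), (0, 0)), (0, 0)) with hd0
  set ks := nc.keys with hks
  have hksr : ks = PySem.List.pyRange 0 (E.length : Int) := keys_mkEnum E
  have hknd : ks.Nodup := by rw [hksr]; exact pyr_nodup E.length
  have hbody : (fun (eg : DEG) i =>
        ks.foldl (fun eg j => if (nc.getD i d0).1.2 == (nc.getD j d0).1.1
            then eg.modify i [] (fun l => l ++ [j]) else eg) (eg.insert i []))
      = (fun (eg : DEG) i =>
          eg.insert i (ks.filter (fun j => (nc.getD i d0).1.2 == (nc.getD j d0).1.1))) := by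
    funext eg i
    rw [inner_edge_fold (fun j => (nc.getD i d0).1.2 == (nc.getD j d0).1.1) ks eg i []]
    simp
  have hfold : edgeLoopF nc eg
      = ks.foldl (fun eg i =>
          eg.insert i (ks.filter (fun j => (nc.getD i d0).1.2 == (nc.getD j d0).1.1))) eg := by
    show ks.foldl _ eg = _
    rw [← hbody]
  rw [hfold]
  apply PySem.Dict.ext
  have hitems := overwrite_fold ks
    (fun i => ks.filter (fun j => (nc.getD i d0).1.2 == (nc.getD j d0).1.1))
    (fun k => eg.getD k []) [] m eg (by simpa using hknd)
    (by
      have hegnd : eg.keys.Nodup := by rw [hk]; exact pyr_nodup m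
      have := PySem.Dict.items_eq_map_keys eg hegnd []
      rw [this, hk, pyr_take m E.length hm, ← hksr]
      simp)
  rw [hitems]
  show _ = egItems E
  rw [egItems]
  have hmapmap : ks.map (fun i =>
        (i, ks.filter (fun j => (nc.getD i d0).1.2 == (nc.getD j d0).1.1)))
      = (PySem.List.enumerate E).map (fun ie =>
          (ie.1, ks.filter (fun j => (nc.getD ie.1 d0).1.2 == (nc.getD j d0).1.1))) := by
    show ((PySem.List.enumerate E).map (fun p => p.1)).map _ = _
    rw [List.map_map]
    rfl
  rw [hmapmap]
  simp only [List.nil_append]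
  apply List.map_congr_left
  intro ie hie
  rw [getD_mkEnum E ie hie]
  congr 1
  rw [adjE]
  have : ks.filter (fun j => ie.2.1.2 == (nc.getD j d0).1.1)
      = ((PySem.List.enumerate E).filter (fun je => ie.2.1.2 == (nc.getD je.1 d0).1.1)).map
          (fun p => p.1) := by
    show ((PySem.List.enumerate E).map (fun p => p.1)).filter _ = _
    rw [List.filter_map]
    rfl
  rw [this]
  congr 1
  apply List.filter_congr
  intro je hje
  rw [getD_mkEnum E je hje]
def edgesOf (g : List (Int × Int × List ((Int × Int) × Int))) : List NCv :=
  g.flatMap (fun e => e.2.2.map (edm (e.1, e.2.1)))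
def bodyC (st : Int × DNC × DEG × DCV) (e : Int × Int × List ((Int × Int) × Int)) :
    Int × DNC × DEG × DCV :=
  let c := (e.2.2.map (edm (e.1, e.2.1))).foldl coreStep (st.1, st.2.1, st.2.2.2)
  (c.1, c.2.1, edgeLoopF c.2.1 st.2.2.1, c.2.2)

lemma keys_mkEg (E : List NCv) :
    (PySem.Dict.mk (egItems E) : DEG).keys = PySem.List.pyRange 0 (E.length : Int) := by
  show (egItems E).map (fun p => p.1) = _
  rw [egItems, List.map_map]
  have : ((fun p : Int × List Int => p.1) ∘ fun ie : Int × NCv => (ie.1, adjE E ie.2))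
      = fun p => p.1 := rfl
  rw [this, PySem.List.map_fst_enumerate, zero_add]

lemma main_fold (l : List (Int × Int × List ((Int × Int) × Int))) :
    ∀ (E0 : List NCv) (cv0 : DCV) (eg0 : DEG),
    eg0.keys = PySem.List.pyRange 0 (E0.length : Int) →
    l.foldl bodyC ((E0.length : Int), PySem.Dict.mk (PySem.List.enumerate E0), eg0, cv0)
      = (((E0 ++ edgesOf l).length : Int),
         PySem.Dict.mk (PySem.List.enumerate (E0 ++ edgesOf l)),
         (if l.isEmpty then eg0 else PySem.Dict.mk (egItems (E0 ++ edgesOf l))),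
         (PySem.List.enumerate (edgesOf l) (E0.length : Int)).foldl cvStep cv0) := by
  induction l with
  | nil =>
    intro E0 cv0 eg0 hk
    simp [edgesOf]
  | cons e l ih =>
    intro E0 cv0 eg0 hk
    simp only [List.foldl_cons]
    have hstep : bodyC ((E0.length : Int), PySem.Dict.mk (PySem.List.enumerate E0), eg0, cv0) e
        = (((E0 ++ e.2.2.map (edm (e.1, e.2.1))).length : Int),
           PySem.Dict.mk (PySem.List.enumerate (E0 ++ e.2.2.map (edm (e.1, e.2.1)))),
           PySem.Dict.mk (egItems (E0 ++ e.2.2.map (edm (e.1, e.2.1)))),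
           (PySem.List.enumerate (e.2.2.map (edm (e.1, e.2.1))) (E0.length : Int)).foldl cvStep cv0) := by
      rw [bodyC]
      simp only [core_fold]
      rw [edgeLoop_eq _ E0.length eg0 (by simp) hk]
    rw [hstep, ih (E0 ++ e.2.2.map (edm (e.1, e.2.1)))
        ((PySem.List.enumerate (e.2.2.map (edm (e.1, e.2.1))) (E0.length : Int)).foldl cvStep cv0)
        (PySem.Dict.mk (egItems (E0 ++ e.2.2.map (edm (e.1, e.2.1)))))
        (keys_mkEg _)]
    have hEo : edgesOf (e :: l) = e.2.2.map (edm (e.1, e.2.1)) ++ edgesOf l := by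
      rw [edgesOf, List.flatMap_cons, edgesOf]
    rw [hEo]
    refine Prod.ext (by push_cast; simp) (Prod.ext (by simp) (Prod.ext ?_ ?_))
    · by_cases hl : l.isEmpty
      · rw [List.isEmpty_iff] at hl
        subst hl
        simp [edgesOf]
      · simp only [hl, List.isEmpty_cons, Bool.false_eq_true, if_false]
        simp [List.append_assoc]
    · dsimp only
      rw [PySem.List.enumerate_append, List.foldl_append]
      congr 2
      push_cast [List.length_append]
      ring

theorem main_spec (g : List (Int × Int × List ((Int × Int) × Int)))
    (hpre : (g.map (fun e => (e.1, e.2.1))).Nodup) :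
    to_labeled_edge_graph g = to_labeled_edge_graph_alt g := by
  have hedges : g.foldl
      (fun acc e => acc ++ e.2.2.map (fun p => (((e.1, e.2.1), p.1), (p.2, p.1.2)))) []
      = edgesOf g := by
    rw [PySem.List.foldl_append_eq_flatMap]
    rfl
  have hA : g.foldl
      (fun (st : Int × DNC × DEG × DCV) e =>
        let node_from := (e.1, e.2.1)
        let st1 := (tlegLookup g node_from).foldl
          (fun st p =>
            let (n, nc, eg, cv) := st
            let value := (p.2, p.1.2)
            let nc := nc.insert n ((node_from, p.1), value)
            let cv := if cv.contains value then cv else cv.insert value []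
            let cv := cv.modify value [] (fun l => l ++ [n])
            (n + 1, nc, eg, cv)) st
        let (n, nc, eg, cv) := st1
        let eg := nc.keys.foldl
          (fun eg i =>
            let eg := eg.insert i []
            nc.keys.foldl
              (fun eg j =>
                if (nc.getD i (((0, 0), (0, 0)), (0, 0))).1.2 ==
                   (nc.getD j (((0, 0), (0, 0)), (0, 0))).1.1
                then eg.modify i [] (fun l => l ++ [j]) else eg) eg) eg
        (n, nc, eg, cv))
      (0, PySem.Dict.empty, PySem.Dict.empty, PySem.Dict.empty)
      = g.foldl bodyC (0, PySem.Dict.empty, PySem.Dict.empty, PySem.Dict.empty) := by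
    apply PySem.List.foldl_congr_mem
    intro st e he
    have hlk : tlegLookup g (e.1, e.2.1) = e.2.2 := by
      rw [tlegLookup, lookup_self0 g hpre e he]
    simp only [hlk, innerA_eq]
    rfl
  have hmain := main_fold g [] PySem.Dict.empty PySem.Dict.empty rfl
  simp only [List.length_nil, Nat.cast_zero, List.nil_append] at hmain
  have hinit : (PySem.Dict.mk (PySem.List.enumerate ([] : List NCv)) : DNC) = PySem.Dict.empty := rfl
  rw [hinit] at hmain
  rw [to_labeled_edge_graph, to_labeled_edge_graph_alt, hedges, hA, hmain]
  rw [PySem.List.foldl_prod_mk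
    (f := fun (d : DCV) (ie : Int × NCv) => d.modify ie.2.1.1 [] (fun l => l ++ [ie.1]))
    (g := fun (d : DCV) (ie : Int × NCv) => d.modify ie.2.2 [] (fun l => l ++ [ie.1]))]
  dsimp only
  refine Prod.ext ?_ (Prod.ext rfl (Prod.ext rfl rfl))
  by_cases hg : g.isEmpty
  · rw [List.isEmpty_iff] at hg
    subst hg
    rfl
  · simp only [hg, Bool.false_eq_true, if_false]
    show egItems (edgesOf g) = _
    rw [egItems]
    apply List.map_congr_left
    intro ie hie
    rw [bysrc_getD (edgesOf g) ie.2.1.2]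
    congr 1
    rw [adjE]
    congr 1
    apply List.filter_congr
    intro je hje
    exact (Bool.beq_comm ..)


-- ===== VERDICT (by name: the statement is the Claim_ definition above) =====
theorem to_labeled_edge_graph_spec : Claim_equal_to_labeled_edge_graph := by
  intro g _hdom hpre
  exact main_spec g hpre
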